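-- pv_equiv track=rewrite | github.com/Rayhanpatel/functiongemma-hackathon | main.py | _semantic_check
-- ===== SOURCE A (Python) =====
-- def _semantic_check(function_calls, query):
--     """
--     Validate that the model's selected tool makes semantic sense for the query.
--     Returns True if the tool selection looks correct.
--
--     This catches cases where the 270M model picks the WRONG tool:
--     e.g., "Play jazz music" → model picks set_alarm instead of play_music.
--     """
--     # General-purpose keyword → tool mapping
--     TOOL_SIGNALS = {
--         "get_weather": ["weather", "temperature", "forecast", "climate"],
--         "set_alarm": ["alarm", "wake"],
--         "set_timer": ["timer", "countdown", "minute timer"],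
--         "play_music": ["play", "music", "song", "listen", "playlist"],
--         "send_message": ["send", "message", "text", "tell"],
--         "search_contacts": ["find", "search", "look up", "contacts", "contact"],
--         "create_reminder": ["remind", "reminder"],
--     }
--
--     query_lower = query.lower()
--
--     for call in function_calls:
--         tool_name = call.get("name", "")
--         if tool_name not in TOOL_SIGNALS:
--             continue
--
--         # Check: does ANY keyword for this tool appear in the query?
--         tool_keywords = TOOL_SIGNALS[tool_name]
--         tool_matches = any(kw in query_lower for kw in tool_keywords)
--
--         if not tool_matches:
--             # The model picked a tool that has NO keyword match with the query.
--             # Check if a DIFFERENT tool would match better.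
--             for other_tool, other_keywords in TOOL_SIGNALS.items():
--                 if other_tool != tool_name and any(kw in query_lower for kw in other_keywords):
--                     # Another tool matches the query better → wrong selection
--                     return False
--
--     return True
-- ===== SOURCE B (Python) =====
-- def _semantic_check(function_calls, query):
--     """Same check, index-first: compute the set of matching tools once,
--     then a single scan over the calls."""
--     TOOL_SIGNALS = {
--         "get_weather": ["weather", "temperature", "forecast", "climate"],
--         "set_alarm": ["alarm", "wake"],
--         "set_timer": ["timer", "countdown", "minute timer"],
--         "play_music": ["play", "music", "song", "listen", "playlist"],
--         "send_message": ["send", "message", "text", "tell"],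
--         "search_contacts": ["find", "search", "look up", "contacts", "contact"],
--         "create_reminder": ["remind", "reminder"],
--     }
--     query_lower = query.lower()
--     matched = {tool for tool, kws in TOOL_SIGNALS.items()
--                if any(kw in query_lower for kw in kws)}
--     if not matched:
--         return True
--     for call in function_calls:
--         tool_name = call.get("name", "")
--         if tool_name in TOOL_SIGNALS and tool_name not in matched:
--             return False
--     return True
-- ===== Notes on version B (the rewrite author's own statement) =====
-- stated objective: simpler
-- what changed: B precomputes the set of tools whose keywords match the query once, then makes a single membership-test pass over the calls, instead of A's per-call keyword rescan plus a nested rescan of the whole signal map on a mismatch.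
import Mathlib
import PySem

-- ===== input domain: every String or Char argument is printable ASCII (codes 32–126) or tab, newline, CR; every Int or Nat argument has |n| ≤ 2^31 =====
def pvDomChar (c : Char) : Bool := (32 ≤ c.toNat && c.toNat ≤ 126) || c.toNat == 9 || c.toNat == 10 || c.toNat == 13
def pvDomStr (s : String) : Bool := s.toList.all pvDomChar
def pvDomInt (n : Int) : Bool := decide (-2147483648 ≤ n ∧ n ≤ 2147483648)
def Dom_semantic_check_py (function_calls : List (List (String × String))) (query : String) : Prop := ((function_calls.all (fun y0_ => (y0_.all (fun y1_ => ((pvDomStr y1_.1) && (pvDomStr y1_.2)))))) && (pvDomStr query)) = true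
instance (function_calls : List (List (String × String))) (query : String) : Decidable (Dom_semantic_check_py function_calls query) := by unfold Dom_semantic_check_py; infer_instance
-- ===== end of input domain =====

-- B precomputes the set of keyword-matching tools once and then makes a single membership-test
-- pass over the calls, instead of A's per-call keyword check with a nested rescan of the whole
-- signal map on every mismatch (objective: simpler).

-- the constant TOOL_SIGNALS dict, shared by both ports (as in both Python sources)
def pvSignals : List (String × List String) :=
  [("get_weather", ["weather", "temperature", "forecast", "climate"]),
   ("set_alarm", ["alarm", "wake"]),
   ("set_timer", ["timer", "countdown", "minute timer"]),
   ("play_music", ["play", "music", "song", "listen", "playlist"]),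
   ("send_message", ["send", "message", "text", "tell"]),
   ("search_contacts", ["find", "search", "look up", "contacts", "contact"]),
   ("create_reminder", ["remind", "reminder"])]

-- ===== PORT A =====
-- A's 'for call in function_calls' loop (ql = query.lower(), computed once before the loop)
def pvALoop (ql : String) : List (List (String × String)) → Bool
  | [] => true
  | call :: rest =>
    let tool_name := PySem.Dict.getD ⟨call⟩ "name" ""
    if !((pvSignals.map Prod.fst).contains tool_name) then pvALoop ql rest
    else
      let tool_keywords := PySem.Dict.getD ⟨pvSignals⟩ tool_name []
      let tool_matches := tool_keywords.any (fun kw => PySem.Str.isIn kw ql)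
      if !tool_matches then
        if pvSignals.any (fun p => p.1 != tool_name && p.2.any (fun kw => PySem.Str.isIn kw ql)) then
          false
        else pvALoop ql rest
      else pvALoop ql rest

def semantic_check_py (function_calls : List (List (String × String))) (query : String) : Bool :=
  pvALoop (PySem.Str.lower query) function_calls

-- ===== PORT B =====
-- B's single pass over the calls, with the precomputed matched set
def pvBLoop (matched : PySem.Set String) : List (List (String × String)) → Bool
  | [] => true
  | call :: rest =>
    let tool_name := PySem.Dict.getD ⟨call⟩ "name" ""
    if (pvSignals.map Prod.fst).contains tool_name && !(matched.contains tool_name) then false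
    else pvBLoop matched rest

def semantic_check_py_alt (function_calls : List (List (String × String))) (query : String) : Bool :=
  let ql := PySem.Str.lower query
  let matched := PySem.Set.ofList
    (pvSignals.filterMap (fun p => if p.2.any (fun kw => PySem.Str.isIn kw ql) then some p.1 else none))
  if matched.isEmpty then true
  else pvBLoop matched function_calls

-- ===== PRECONDITION & SPEC =====
def Spec_semantic_check_py (function_calls : List (List (String × String))) (query : String) (out : Bool) : Prop := out = semantic_check_py_alt function_calls query
instance (function_calls : List (List (String × String))) (query : String) (out : Bool) : Decidable (Spec_semantic_check_py function_calls query out) := by unfold Spec_semantic_check_py; infer_instance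

-- ===== CLAIM (what is proved, stated in full; the proofs are below) =====
def Claim_equal_semantic_check_py : Prop := ∀ (function_calls : List (List (String × String))) (query : String), Dom_semantic_check_py function_calls query → Spec_semantic_check_py function_calls query (semantic_check_py function_calls query)

-- ===== LEMMAS AND PROOFS =====

-- the keys of the constant signal map are pairwise distinct
theorem pvKeysNodup : (pvSignals.map Prod.fst).Nodup := by decide

-- with distinct keys, dict lookup of an entry's key returns that entry's value
theorem pvGetD_of_mem {S : List (String × List String)} (h : (S.map Prod.fst).Nodup)
    {p : String × List String} (hp : p ∈ S) : PySem.Dict.getD ⟨S⟩ p.1 [] = p.2 := by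
  induction S with
  | nil => cases hp
  | cons q t ih =>
    simp only [List.map_cons, List.nodup_cons] at h
    rcases List.mem_cons.mp hp with rfl | hp'
    · simp [PySem.Dict.getD, PySem.Dict.get?, List.find?]
    · have hne : (q.1 == p.1) = false :=
        beq_eq_false_iff_ne.mpr (fun e => h.1 (e ▸ List.mem_map_of_mem hp'))
      have := ih h.2 hp'
      simpa [PySem.Dict.getD, PySem.Dict.get?, List.find?, hne] using this

-- when some tool's keywords match the query, A's loop equals B's loop over any set `matched`
-- that contains exactly the matching tool names
theorem pvALoop_eq_pvBLoop (ql : String) (matched : PySem.Set String)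
    (hmem : ∀ name, matched.contains name = true ↔
      ∃ p ∈ pvSignals, (p.2.any fun kw => PySem.Str.isIn kw ql) = true ∧ p.1 = name)
    (h : ∃ p ∈ pvSignals, (p.2.any fun kw => PySem.Str.isIn kw ql) = true) :
    ∀ fc, pvALoop ql fc = pvBLoop matched fc := by
  intro fc
  induction fc with
  | nil => rfl
  | cons call rest ih =>
    by_cases hk : PySem.Dict.getD ⟨call⟩ "name" "" ∈ pvSignals.map Prod.fst
    · obtain ⟨p₀, hp₀, hp₀1⟩ := List.mem_map.mp hk
      have hkc : (pvSignals.map Prod.fst).contains (PySem.Dict.getD ⟨call⟩ "name" "") = true := by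
        simpa using hk
      have hget : PySem.Dict.getD ⟨pvSignals⟩ (PySem.Dict.getD ⟨call⟩ "name" "") [] = p₀.2 :=
        hp₀1 ▸ pvGetD_of_mem pvKeysNodup hp₀
      by_cases htm : (p₀.2.any fun kw => PySem.Str.isIn kw ql) = true
      · -- the selected tool itself matches: both loops continue
        have hc : matched.contains (PySem.Dict.getD ⟨call⟩ "name" "") = true :=
          (hmem _).mpr ⟨p₀, hp₀, htm, hp₀1⟩
        simp only [pvALoop, pvBLoop, hkc, hget, htm, hc]
        simpa using ih
      · -- the selected tool does not match: A's inner rescan fires, B sees the tool outside matched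
        have htm' : (p₀.2.any fun kw => PySem.Str.isIn kw ql) = false := by
          simpa using htm
        have hc : matched.contains (PySem.Dict.getD ⟨call⟩ "name" "") = false := by
          rw [Bool.eq_false_iff]
          intro hcon
          obtain ⟨p, hp, hm, hp1⟩ := (hmem _).mp hcon
          have e1 := pvGetD_of_mem pvKeysNodup hp
          rw [hp1] at e1
          exact htm ((e1.symm.trans hget) ▸ hm)
        have hinner : (pvSignals.any fun p =>
            p.1 != PySem.Dict.getD ⟨call⟩ "name" "" && p.2.any fun kw => PySem.Str.isIn kw ql) = true := by
          obtain ⟨p, hp, hm⟩ := h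
          have hne : (p.1 != PySem.Dict.getD ⟨call⟩ "name" "") = true := by
            rw [bne_iff_ne]
            intro e
            have e1 := pvGetD_of_mem pvKeysNodup hp
            rw [e] at e1
            exact htm ((e1.symm.trans hget) ▸ hm)
          exact List.any_eq_true.mpr ⟨p, hp, by rw [hne, hm]; rfl⟩
        simp only [pvALoop, pvBLoop, hkc, hget, htm', hinner, hc]
        simp
    · -- unknown tool name: both loops skip the call
      have hkc : (pvSignals.map Prod.fst).contains (PySem.Dict.getD ⟨call⟩ "name" "") = false := by
        simpa using hk
      simp only [pvALoop, pvBLoop, hkc]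
      simpa using ih

-- when no tool's keywords match the query, A's loop never returns False
theorem pvALoop_true (ql : String)
    (h : ∀ p ∈ pvSignals, (p.2.any fun kw => PySem.Str.isIn kw ql) = false) :
    ∀ fc, pvALoop ql fc = true := by
  intro fc
  induction fc with
  | nil => rfl
  | cons call rest ih =>
    have hany : (pvSignals.any fun p =>
        p.1 != PySem.Dict.getD ⟨call⟩ "name" "" && p.2.any fun kw => PySem.Str.isIn kw ql) = false := by
      rw [List.any_eq_false]
      intro p hp
      rw [h p hp]
      simp
    simp only [pvALoop, hany]
    split_ifs <;> simp_all

-- the loops agree for every lowered query, case split on whether the matched set is empty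
theorem pvMain (ql : String) (fc : List (List (String × String))) :
    pvALoop ql fc =
      (if (PySem.Set.ofList (pvSignals.filterMap
            (fun p => if p.2.any (fun kw => PySem.Str.isIn kw ql) then some p.1 else none))).isEmpty
       then true
       else pvBLoop (PySem.Set.ofList (pvSignals.filterMap
            (fun p => if p.2.any (fun kw => PySem.Str.isIn kw ql) then some p.1 else none))) fc) := by
  by_cases hm : ∃ p ∈ pvSignals, (p.2.any fun kw => PySem.Str.isIn kw ql) = true
  · have hne : (PySem.Set.ofList (pvSignals.filterMap
        (fun p => if p.2.any (fun kw => PySem.Str.isIn kw ql) then some p.1 else none))).isEmpty = false := by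
      obtain ⟨p, hp, hpf⟩ := hm
      have hmem : p.1 ∈ PySem.Set.ofList (pvSignals.filterMap
          (fun p => if p.2.any (fun kw => PySem.Str.isIn kw ql) then some p.1 else none)) :=
        (PySem.Set.mem_ofList _ _).mpr (List.mem_filterMap.mpr ⟨p, hp, by rw [hpf]; rfl⟩)
      cases hE : (PySem.Set.ofList (pvSignals.filterMap
          (fun p => if p.2.any (fun kw => PySem.Str.isIn kw ql) then some p.1 else none))).isEmpty
      · rfl
      · rw [List.isEmpty_iff.mp hE] at hmem
        cases hmem
    rw [hne, if_neg (by simp)]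
    refine pvALoop_eq_pvBLoop ql _ (fun name => ?_) hm fc
    rw [PySem.Set.contains_iff, PySem.Set.mem_ofList, List.mem_filterMap]
    constructor
    · rintro ⟨p, hp, hgp⟩
      split_ifs at hgp with hb
      exact ⟨p, hp, hb, by simpa using hgp⟩
    · rintro ⟨p, hp, hb, rfl⟩
      exact ⟨p, hp, by rw [hb]; rfl⟩
  · have h0 : ∀ p ∈ pvSignals, (p.2.any fun kw => PySem.Str.isIn kw ql) = false := by
      intro p hp
      rw [Bool.eq_false_iff]
      exact fun hb => hm ⟨p, hp, hb⟩
    have he : pvSignals.filterMap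
        (fun p => if p.2.any (fun kw => PySem.Str.isIn kw ql) then some p.1 else none) = [] := by
      rw [List.filterMap_eq_nil_iff]
      intro p hp
      rw [h0 p hp]
      rfl
    rw [he]
    simpa using pvALoop_true ql h0 fc

-- ===== VERDICT (by name: the statement is the Claim_ definition above) =====
theorem semantic_check_py_spec : Claim_equal_semantic_check_py := by
  intro function_calls query _
  exact pvMain (PySem.Str.lower query) function_calls
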